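-- pv_equiv track=rewrite | github.com/Mindstorm233/SMMAgent | draw/layout.py | generate_grid_coords
-- ===== SOURCE A (Python) =====
-- def generate_grid_coords(instances, x_pitch=9, y_pitch=15):
--     coords = {}
--     cols = 5
--     for i, inst in enumerate(instances):
--         iid = str(inst.get("inst_id", ""))
--         row, col = i // cols, i % cols
--         coords[iid] = (col * x_pitch, -row * y_pitch)
--     return coords
-- ===== SOURCE B (Python) =====
-- def generate_grid_coords(instances, x_pitch=9, y_pitch=15):
--     coords = {}
--     row = 0
--     while instances:
--         block, instances = instances[:5], instances[5:]
--         for col, inst in enumerate(block):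
--             coords[str(inst.get("inst_id", ""))] = (col * x_pitch, -row * y_pitch)
--         row += 1
--     return coords
-- ===== Notes on version B (the rewrite author's own statement) =====
-- stated objective: alternative
-- what changed: Replaces the flat enumerate loop computing row/col via i//5 and i%5 with a nested traversal: an outer loop over consecutive blocks of 5 instances (row counter) and an inner enumerate over each block (col counter), preserving insertion/overwrite order.
import Mathlib
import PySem

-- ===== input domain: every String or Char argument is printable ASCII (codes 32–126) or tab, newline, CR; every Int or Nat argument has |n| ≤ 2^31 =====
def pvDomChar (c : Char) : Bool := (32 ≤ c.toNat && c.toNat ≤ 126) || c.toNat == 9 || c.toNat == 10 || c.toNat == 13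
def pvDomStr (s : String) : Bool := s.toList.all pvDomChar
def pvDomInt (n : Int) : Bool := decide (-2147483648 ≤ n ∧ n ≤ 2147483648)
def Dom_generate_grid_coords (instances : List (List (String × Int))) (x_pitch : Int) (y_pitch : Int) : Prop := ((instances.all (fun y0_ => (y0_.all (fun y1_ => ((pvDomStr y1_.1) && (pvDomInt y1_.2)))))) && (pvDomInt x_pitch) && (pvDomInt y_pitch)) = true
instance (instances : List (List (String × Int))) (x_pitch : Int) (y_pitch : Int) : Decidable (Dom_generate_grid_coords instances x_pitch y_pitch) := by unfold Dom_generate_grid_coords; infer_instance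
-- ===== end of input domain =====

-- B replaces the flat enumerate + i//5, i%5 computation by a nested traversal over blocks of 5 (alternative decomposition, same cost).
-- ===== PORT A =====
-- id-string shared helper: str(inst.get("inst_id", "")) — same expression in both Pythons
def pvIdStr (inst : List (String × Int)) : String :=
  match (PySem.Dict.mk inst).get? "inst_id" with
  | some n => PySem.Int.toStr n
  | none => ""

-- A: flat enumerate loop, row/col from i // 5 and i % 5, dict overwrite
def pvAGo (x_pitch y_pitch : Int) : List (List (String × Int)) → Int → PySem.Dict String (Int × Int) → PySem.Dict String (Int × Int)
  | [], _, d => d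
  | inst :: rest, i, d =>
      pvAGo x_pitch y_pitch rest (i + 1)
        (d.insert (pvIdStr inst) (PySem.Int.mod i 5 * x_pitch, -(PySem.Int.floordiv i 5) * y_pitch))

def generate_grid_coords (instances : List (List (String × Int))) (x_pitch : Int) (y_pitch : Int) : List (String × Int × Int) :=
  (pvAGo x_pitch y_pitch instances 0 PySem.Dict.empty).items

-- ===== PORT B =====
-- B: outer loop over blocks of 5 (row counter), inner enumerate over the block (col counter)
def pvBRow (x_pitch y_pitch row : Int) : List (List (String × Int)) → Int → PySem.Dict String (Int × Int) → PySem.Dict String (Int × Int)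
  | [], _, d => d
  | inst :: rest, col, d =>
      pvBRow x_pitch y_pitch row rest (col + 1)
        (d.insert (pvIdStr inst) (col * x_pitch, -row * y_pitch))

def pvBGo (x_pitch y_pitch : Int) (xs : List (List (String × Int))) (row : Int) (d : PySem.Dict String (Int × Int)) : PySem.Dict String (Int × Int) :=
  match xs with
  | [] => d
  | x :: rest => pvBGo x_pitch y_pitch ((x :: rest).drop 5) (row + 1) (pvBRow x_pitch y_pitch row ((x :: rest).take 5) 0 d)
termination_by xs.length
decreasing_by simp [List.length_drop]

def generate_grid_coords_alt (instances : List (List (String × Int))) (x_pitch : Int) (y_pitch : Int) : List (String × Int × Int) :=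
  (pvBGo x_pitch y_pitch instances 0 PySem.Dict.empty).items

-- ===== PRECONDITION & SPEC =====
def Spec_generate_grid_coords (instances : List (List (String × Int))) (x_pitch : Int) (y_pitch : Int) (out : List (String × Int × Int)) : Prop := out = generate_grid_coords_alt instances x_pitch y_pitch
instance (instances : List (List (String × Int))) (x_pitch : Int) (y_pitch : Int) (out : List (String × Int × Int)) : Decidable (Spec_generate_grid_coords instances x_pitch y_pitch out) := by unfold Spec_generate_grid_coords; infer_instance

-- ===== CLAIM (what is proved, stated in full; the proofs are below) =====
def Claim_equal_generate_grid_coords : Prop := ∀ (instances : List (List (String × Int))) (x_pitch : Int) (y_pitch : Int), Dom_generate_grid_coords instances x_pitch y_pitch → Spec_generate_grid_coords instances x_pitch y_pitch (generate_grid_coords instances x_pitch y_pitch)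

-- ===== LEMMAS AND PROOFS =====
theorem pvAGo_append (xp yp : Int) (l1 l2 : List (List (String × Int))) (i : Int) (d : PySem.Dict String (Int × Int)) :
    pvAGo xp yp (l1 ++ l2) i d = pvAGo xp yp l2 (i + l1.length) (pvAGo xp yp l1 i d) := by
  induction l1 generalizing i d with
  | nil => simp [pvAGo]
  | cons a t ih => simp [pvAGo, ih]; ring_nf

theorem pvRow_eq (xp yp row c : Int) (chunk : List (List (String × Int))) (d : PySem.Dict String (Int × Int))
    (hc : 0 ≤ c) (hlen : c + chunk.length ≤ 5) :
    pvAGo xp yp chunk (5 * row + c) d = pvBRow xp yp row chunk c d := by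
  induction chunk generalizing c d with
  | nil => simp [pvAGo, pvBRow]
  | cons a t ih =>
    simp only [pvAGo, pvBRow]
    have h5 : (0:Int) < 5 := by norm_num
    have hmod : PySem.Int.mod (5 * row + c) 5 = c := by
      rw [PySem.Int.mod_eq_emod_of_pos h5]; simp at hlen; omega
    have hdiv : PySem.Int.floordiv (5 * row + c) 5 = row := by
      rw [PySem.Int.floordiv_eq_ediv_of_pos h5]; simp at hlen; omega
    rw [hmod, hdiv]
    have : 5 * row + c + 1 = 5 * row + (c + 1) := by ring
    rw [this, ih (c + 1) _ (by omega) (by simp at hlen ⊢; omega)]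

theorem pvGo_eq_aux (xp yp : Int) (n : Nat) : ∀ (xs : List (List (String × Int))), xs.length ≤ n →
    ∀ (row : Int) (d : PySem.Dict String (Int × Int)),
    pvAGo xp yp xs (5 * row) d = pvBGo xp yp xs row d := by
  induction n with
  | zero =>
    intro xs hxs row d
    have : xs = [] := List.eq_nil_of_length_eq_zero (by omega)
    subst this; simp [pvAGo, pvBGo]
  | succ n ih =>
    intro xs hxs row d
    match xs with
    | [] => simp [pvAGo, pvBGo]
    | x :: rest =>
    rw [pvBGo]
    conv_lhs => rw [← List.take_append_drop 5 (x :: rest)]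
    rw [pvAGo_append]
    rw [show (5:Int) * row = 5 * row + 0 from by ring,
        pvRow_eq xp yp row 0 _ d le_rfl (by simp only [List.length_take]; omega)]
    by_cases h : (x :: rest).length ≤ 5
    · have hd : (x :: rest).drop 5 = [] := List.drop_eq_nil_of_le h
      rw [hd]; simp [pvAGo, pvBGo]
    · have hl : ((x :: rest).take 5).length = 5 := by
        simp only [List.length_take]; omega
      rw [hl, show (5:Int) * row + 0 + (5:Nat) = 5 * (row + 1) from by push_cast; ring]
      refine ih ((x :: rest).drop 5) ?_ (row + 1) _
      simp only [List.length_drop] at hxs ⊢; omega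

theorem pvGo_eq (xp yp : Int) (xs : List (List (String × Int))) (row : Int) (d : PySem.Dict String (Int × Int)) :
    pvAGo xp yp xs (5 * row) d = pvBGo xp yp xs row d :=
  pvGo_eq_aux xp yp xs.length xs le_rfl row d


-- ===== VERDICT (by name: the statement is the Claim_ definition above) =====
theorem generate_grid_coords_spec : Claim_equal_generate_grid_coords := by
  intro instances xp yp _
  unfold Spec_generate_grid_coords generate_grid_coords generate_grid_coords_alt
  have h := pvGo_eq xp yp instances 0 PySem.Dict.empty
  rw [show (5:Int) * 0 = 0 from by ring] at h
  rw [h]
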